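-- pv_equiv track=rewrite | github.com/nebulosa2007/EulerProject | project_euler_defs.py | product_multiply
-- ===== SOURCE A (Python) =====
-- def product_multiply(matrix, n):
--     """Возвращает список произведений n элементов в строках матрицы"""
--     product = []
--     for i in range(len(matrix[0]) - n + 1):
--         for j in range(len(matrix)):
--             num = 1
--             for k in range(n):
--                 num *= matrix[j][i + k]
--             product.append(num)
--     return(product)
-- ===== SOURCE B (Python) =====
-- def product_multiply(matrix, n):
--     """Возвращает список произведений n элементов в строках матрицы"""
--     cols = len(matrix[0])
--     w = cols - n + 1
--     if w <= 0:
--         return []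
--     per_row = []
--     for row in matrix:
--         prods = []
--         nonzero = 1
--         zeros = 0
--         for k in range(cols):
--             x = row[k]
--             if x == 0:
--                 zeros += 1
--             else:
--                 nonzero *= x
--             if k >= n:
--                 y = row[k - n]
--                 if y == 0:
--                     zeros -= 1
--                 else:
--                     nonzero //= y
--             if k >= n - 1:
--                 prods.append(0 if zeros else nonzero)
--         per_row.append(prods)
--     return [p[i] for i in range(w) for p in per_row]
-- ===== Notes on version B (the rewrite author's own statement) =====
-- stated objective: alternative
-- what changed: A recomputes an n-element product from scratch for every (window, row) pair; B makes one sliding-window pass per row maintaining a running product of the nonzero window entries plus a zero counter (divide out the leaving entry, multiply in the entering one), then emits the per-row tables in A's window-major order, removing the O(n) inner loop; on the probe's timing inputs (small n) this was not measurably faster, so no speed is claimed.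
-- outside the precondition, e.g. on product_multiply([[1, 2]], 0): A returns [1, 1, 1], B raises IndexError
import Mathlib
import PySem

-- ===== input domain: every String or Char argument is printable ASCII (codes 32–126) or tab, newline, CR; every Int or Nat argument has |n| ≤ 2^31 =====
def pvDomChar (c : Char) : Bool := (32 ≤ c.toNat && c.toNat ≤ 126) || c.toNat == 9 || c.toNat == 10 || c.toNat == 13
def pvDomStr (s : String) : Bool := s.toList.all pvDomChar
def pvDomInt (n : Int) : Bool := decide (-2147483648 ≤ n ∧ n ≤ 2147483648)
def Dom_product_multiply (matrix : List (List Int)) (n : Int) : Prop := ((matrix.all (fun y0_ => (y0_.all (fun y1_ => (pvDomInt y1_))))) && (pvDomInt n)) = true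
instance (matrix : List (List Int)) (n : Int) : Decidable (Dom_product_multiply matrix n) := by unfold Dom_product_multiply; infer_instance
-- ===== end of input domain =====

-- B replaces A's recomputed length-n product per (window, row) by one per-row sliding-window
-- pass (running product of the nonzero window entries plus a zero counter), emitted window-major.

-- ===== PORT A =====
def product_multiply (matrix : List (List Int)) (n : Int) : List Int :=
  (PySem.List.pyRange 0 (PySem.List.len (PySem.List.pyGetD matrix 0 []) - n + 1) 1).foldl
    (fun product i =>
      (PySem.List.pyRange 0 (PySem.List.len matrix) 1).foldl
        (fun product j =>
          product ++
            [(PySem.List.pyRange 0 n 1).foldl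
              (fun num k => num * PySem.List.pyGetD (PySem.List.pyGetD matrix j []) (i + k) 0) 1])
        product)
    []

-- ===== PORT B =====
-- body of B's 'for k in range(cols)' loop; state = (nonzero, zeros, prods)
def pmB_step (row : List Int) (n : Int) : (Int × Int × List Int) → Int → (Int × Int × List Int) :=
  fun (nonzero, zeros, prods) k =>
    let x := PySem.List.pyGetD row k 0
    let (nonzero, zeros) := if x = 0 then (nonzero, zeros + 1) else (nonzero * x, zeros)
    let (nonzero, zeros) :=
      if n ≤ k then
        let y := PySem.List.pyGetD row (k - n) 0
        if y = 0 then (nonzero, zeros - 1) else (PySem.Int.floordiv nonzero y, zeros)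
      else (nonzero, zeros)
    let prods := if n - 1 ≤ k then prods ++ [if zeros = 0 then nonzero else 0] else prods
    (nonzero, zeros, prods)

-- the per-row sliding-window pass: the 'prods' list B builds for one row
def pmB_row (row : List Int) (cols n : Int) : List Int :=
  ((PySem.List.pyRange 0 cols 1).foldl (pmB_step row n) (1, 0, [])).2.2

def product_multiply_alt (matrix : List (List Int)) (n : Int) : List Int :=
  let cols := PySem.List.len (PySem.List.pyGetD matrix 0 [])
  let w := cols - n + 1
  if w ≤ 0 then []
  else
    let perRow := matrix.foldl (fun acc row => acc ++ [pmB_row row cols n]) []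
    (PySem.List.pyRange 0 w 1).flatMap
      (fun i => perRow.map (fun p => PySem.List.pyGetD p i 0))

-- ===== PRECONDITION & SPEC =====
-- Pre_ excludes inputs where Python A raises IndexError (the empty matrix; a row shorter than
-- len(matrix[0]) when there is at least one window, so that the windows index it), and n <= 0,
-- where A returns [1]*((cols-n+1)*rows) only because range(n) is empty while B's sliding
-- window scan raises IndexError.
def Pre_product_multiply (matrix : List (List Int)) (n : Int) : Prop :=
  matrix ≠ [] ∧ 1 ≤ n ∧
    ((matrix.headD []).length < n ∨ ∀ row ∈ matrix, (matrix.headD []).length ≤ row.length)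
instance (matrix : List (List Int)) (n : Int) : Decidable (Pre_product_multiply matrix n) := by
  unfold Pre_product_multiply; infer_instance

def pvWitness_product_multiply : List (List Int) × Int := ([[1, 2, 0], [3, -4, 5]], 2)

def Spec_product_multiply (matrix : List (List Int)) (n : Int) (out : List Int) : Prop := out = product_multiply_alt matrix n
instance (matrix : List (List Int)) (n : Int) (out : List Int) : Decidable (Spec_product_multiply matrix n out) := by unfold Spec_product_multiply; infer_instance

-- ===== CLAIM (what is proved, stated in full; the proofs are below) =====
def Claim_equal_product_multiply : Prop := ∀ (matrix : List (List Int)) (n : Int), Dom_product_multiply matrix n → Pre_product_multiply matrix n → Spec_product_multiply matrix n (product_multiply matrix n)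

-- ===== LEMMAS AND PROOFS =====

-- the exact window product ∏ row[j], j ∈ [t, t+nN)
def pvWin (row : List Int) (nN t : Nat) : Int := ∏ j ∈ Finset.Ico t (t + nN), row.getD j 0

-- running product of the nonzero entries of row[a:b] (B's 'nonzero' variable)
def pvNZ (row : List Int) (a b : Nat) : Int :=
  ∏ j ∈ Finset.Ico a b, (if row.getD j 0 = 0 then 1 else row.getD j 0)

-- number of zeros in row[a:b] as an Int (B's 'zeros' variable)
def pvZC (row : List Int) (a b : Nat) : Int :=
  ∑ j ∈ Finset.Ico a b, (if row.getD j 0 = 0 then (1 : Int) else 0)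

-- B's emitted value equals the true window product
lemma pv_zero_or (row : List Int) (a b : Nat) :
    (if pvZC row a b = 0 then pvNZ row a b else 0) = ∏ j ∈ Finset.Ico a b, row.getD j 0 := by
  by_cases h : pvZC row a b = 0
  · rw [if_pos h]
    have hz : ∀ j ∈ Finset.Ico a b, row.getD j 0 ≠ 0 := by
      intro j hj h0
      have := (Finset.sum_eq_zero_iff_of_nonneg
        (fun k _ => by split <;> norm_num)).mp h j hj
      rw [if_pos h0] at this
      exact one_ne_zero this
    exact Finset.prod_congr rfl (fun j hj => if_neg (hz j hj))
  · rw [if_neg h]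
    have : ∃ j ∈ Finset.Ico a b, row.getD j 0 = 0 := by
      by_contra hc
      exact h (Finset.sum_eq_zero (fun j hj => if_neg (fun h0 => hc ⟨j, hj, h0⟩)))
    obtain ⟨j, hj, hz⟩ := this
    exact (Finset.prod_eq_zero hj hz).symm

-- A's innermost loop computes the window product
lemma pvA_inner (row : List Int) (i : Int) (hi : 0 ≤ i) (nN : Nat) :
    (PySem.List.pyRange 0 (nN : Int) 1).foldl
      (fun num k => num * PySem.List.pyGetD row (i + k) 0) 1 = pvWin row nN i.toNat := by
  induction nN with
  | zero => simp [PySem.List.pyRange_one_eq_nil, pvWin]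
  | succ m ih =>
    have hc : ((m + 1 : Nat) : Int) = (m : Int) + 1 := by push_cast; ring
    rw [hc, PySem.List.pyRange_one_succ_right (by positivity), List.foldl_append, ih]
    have hidx : i + (m : Int) = ((i.toNat + m : Nat) : Int) := by omega
    simp only [List.foldl_cons, List.foldl_nil, hidx, PySem.List.pyGetD_natCast]
    rw [pvWin, pvWin, ← Nat.add_assoc, Finset.prod_Ico_succ_top (Nat.le_add_right _ _)]

lemma pvNZ_succ_top (row : List Int) (a b : Nat) (h : a ≤ b) :
    pvNZ row a (b + 1) = pvNZ row a b * (if row.getD b 0 = 0 then 1 else row.getD b 0) :=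
  Finset.prod_Ico_succ_top h _

lemma pvZC_succ_top (row : List Int) (a b : Nat) (h : a ≤ b) :
    pvZC row a (b + 1) = pvZC row a b + (if row.getD b 0 = 0 then 1 else 0) :=
  Finset.sum_Ico_succ_top h _

lemma pvNZ_bot (row : List Int) (a b : Nat) (h : a < b) :
    pvNZ row a b = (if row.getD a 0 = 0 then 1 else row.getD a 0) * pvNZ row (a + 1) b :=
  Finset.prod_eq_prod_Ico_succ_bot h _

lemma pvZC_bot (row : List Int) (a b : Nat) (h : a < b) :
    pvZC row a b = (if row.getD a 0 = 0 then 1 else 0) + pvZC row (a + 1) b :=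
  Finset.sum_eq_sum_Ico_succ_bot h _

-- Python's // undoes the exact multiplication by a nonzero window entry
lemma pv_fdiv_cancel (y p : Int) (hy : y ≠ 0) : PySem.Int.floordiv (y * p) y = p := by
  have hmod : PySem.Int.mod (y * p) y = 0 :=
    (PySem.Int.mod_eq_zero_iff_dvd _ _).mpr ⟨p, rfl⟩
  have hfd := PySem.Int.floordiv_mul_add_mod (y * p) y
  rw [hmod, add_zero] at hfd
  have : PySem.Int.floordiv (y * p) y * y = p * y := by rw [hfd]; ring
  exact mul_right_cancel₀ hy this

-- invariant of B's sliding-window loop after m steps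
lemma pvB_inv (row : List Int) (nN : Nat) (h1 : 1 ≤ nN) (m : Nat) :
    (PySem.List.pyRange 0 (m : Int) 1).foldl (pmB_step row (nN : Int)) (1, 0, []) =
      (pvNZ row (m - nN) m, pvZC row (m - nN) m,
        (List.range (m + 1 - nN)).map (pvWin row nN)) := by
  induction m with
  | zero =>
    simp [PySem.List.pyRange_one_eq_nil, pvNZ, pvZC, Nat.sub_eq_zero_of_le h1]
  | succ m ih =>
    have hc : ((m + 1 : Nat) : Int) = (m : Int) + 1 := by push_cast; ring
    rw [hc, PySem.List.pyRange_one_succ_right (by positivity), List.foldl_append, ih,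
      List.foldl_cons, List.foldl_nil]
    simp only [pmB_step, PySem.List.pyGetD_natCast]
    have hstep1 : (if row.getD m 0 = 0 then (pvNZ row (m - nN) m, pvZC row (m - nN) m + 1)
        else (pvNZ row (m - nN) m * row.getD m 0, pvZC row (m - nN) m)) =
        (pvNZ row (m - nN) (m + 1), pvZC row (m - nN) (m + 1)) := by
      rw [pvNZ_succ_top row _ _ (Nat.sub_le m nN), pvZC_succ_top row _ _ (Nat.sub_le m nN)]
      split <;> simp
    rw [hstep1]
    by_cases hge : nN ≤ m
    · have hgeI : (nN : Int) ≤ (m : Int) := by exact_mod_cast hge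
      have hcast : (m : Int) - (nN : Int) = ((m - nN : Nat) : Int) := by omega
      rw [if_pos hgeI, hcast, PySem.List.pyGetD_natCast]
      have hlt : m - nN < m + 1 := by omega
      have hsub1 : m - nN + 1 = m + 1 - nN := by omega
      have happI : (nN : Int) - 1 ≤ (m : Int) := by omega
      rw [if_pos happI]
      have hZbot := pvZC_bot row (m - nN) (m + 1) hlt
      have hNbot := pvNZ_bot row (m - nN) (m + 1) hlt
      rw [hsub1] at hZbot hNbot
      have hrs : List.range (m + 1 + 1 - nN) = List.range (m + 1 - nN) ++ [m + 1 - nN] := by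
        have : m + 1 + 1 - nN = (m + 1 - nN) + 1 := by omega
        rw [this, List.range_succ]
      by_cases hy : row.getD (m - nN) 0 = 0
      · rw [if_pos hy]
        rw [if_pos hy] at hZbot hNbot
        rw [one_mul] at hNbot
        have hZ : pvZC row (m - nN) (m + 1) - 1 = pvZC row (m + 1 - nN) (m + 1) := by
          rw [hZbot]; ring
        simp only [hNbot, hZ, hrs, List.map_append, List.map_cons, List.map_nil,
          Prod.mk.injEq, true_and]
        simp only [pvWin]
        have hub : m + 1 - nN + nN = m + 1 := by omega
        rw [hub, pv_zero_or]
      · rw [if_neg hy]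
        rw [if_neg hy] at hZbot hNbot
        have hNZ : PySem.Int.floordiv (pvNZ row (m - nN) (m + 1)) (row.getD (m - nN) 0) =
            pvNZ row (m + 1 - nN) (m + 1) := by
          rw [hNbot, pv_fdiv_cancel _ _ hy]
        have hZ : pvZC row (m - nN) (m + 1) = pvZC row (m + 1 - nN) (m + 1) := by
          rw [hZbot]; ring
        simp only [hNZ, hZ, hrs, List.map_append, List.map_cons, List.map_nil,
          Prod.mk.injEq, true_and]
        simp only [pvWin]
        have hub : m + 1 - nN + nN = m + 1 := by omega
        rw [hub, pv_zero_or]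
    · have hgeI : ¬ (nN : Int) ≤ (m : Int) := by exact_mod_cast hge
      rw [if_neg hgeI]
      have h0 : m - nN = 0 := by omega
      by_cases happ : nN ≤ m + 1
      · have happI : (nN : Int) - 1 ≤ (m : Int) := by omega
        rw [if_pos happI]
        have hr0 : m + 1 - nN = 0 := by omega
        have hr1 : m + 1 + 1 - nN = 1 := by omega
        simp only [h0, hr0, hr1, List.range_one, List.range_zero, List.map_cons,
          List.map_nil, Prod.mk.injEq, true_and]
        simp only [pvWin]
        have hub : 0 + nN = m + 1 := by omega
        rw [hub, pv_zero_or, List.nil_append]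
      · have happI : ¬ (nN : Int) - 1 ≤ (m : Int) := by omega
        rw [if_neg happI]
        have hr0 : m + 1 - nN = 0 := by omega
        have hr0' : m + 1 + 1 - nN = 0 := by omega
        simp only [h0, hr0, hr0']

theorem main_eq (matrix : List (List Int)) (n : Int) (hne : matrix ≠ [])
    (hn1 : 1 ≤ n) : product_multiply matrix n = product_multiply_alt matrix n := by
  obtain ⟨r0, rest, rfl⟩ : ∃ r0 rest, matrix = r0 :: rest := by
    cases matrix with
    | nil => exact absurd rfl hne
    | cons a l => exact ⟨a, l, rfl⟩
  have hnn : ((n.toNat : Nat) : Int) = n := Int.toNat_of_nonneg (by omega)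
  have h1 : 1 ≤ n.toNat := by omega
  -- A reshaped into a flatMap of window products
  have hA : product_multiply (r0 :: rest) n =
      (PySem.List.pyRange 0 ((r0.length : Int) - n + 1) 1).flatMap
        (fun i => (r0 :: rest).map (fun row =>
          (PySem.List.pyRange 0 n 1).foldl
            (fun num k => num * PySem.List.pyGetD row (i + k) 0) 1)) := by
    rw [product_multiply, PySem.List.pyGetD_zero_cons]
    simp only [PySem.List.len_eq]
    rw [List.foldl_ext _ (fun product i => product ++ (r0 :: rest).map (fun row =>
          (PySem.List.pyRange 0 n 1).foldl
            (fun num k => num * PySem.List.pyGetD row (i + k) 0) 1)) []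
      (fun acc i _ => by
        rw [PySem.List.foldl_pyRange_zero_pyGetD' (r0 :: rest) []
          (fun product row => product ++
            [(PySem.List.pyRange 0 n 1).foldl (fun num k => num * PySem.List.pyGetD row (i + k) 0) 1]) acc]
        exact PySem.List.foldl_append_singleton_eq_map _ _ _)]
    rw [PySem.List.foldl_append_eq_flatMap, List.nil_append]
  rw [hA, product_multiply_alt]
  simp only [PySem.List.pyGetD_zero_cons, PySem.List.len_eq]
  by_cases hw : (r0.length : Int) - n + 1 ≤ 0
  · rw [if_pos hw, PySem.List.pyRange_one_eq_nil hw, List.flatMap_nil]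
  rw [if_neg hw]
  simp only [PySem.List.foldl_append_singleton_eq_map, List.nil_append, List.map_map]
  refine List.flatMap_congr (fun i hi => ?_)
  rw [PySem.List.mem_pyRange_one] at hi
  refine List.map_congr_left (fun row _ => ?_)
  simp only [Function.comp_apply]
  rw [← hnn, pvA_inner row i hi.1]
  rw [pmB_row]
  rw [show ((r0.length : Int)) = ((r0.length : Nat) : Int) from rfl]
  rw [pvB_inv row n.toNat h1 r0.length]
  have hik : i.toNat < r0.length + 1 - n.toNat := by omega
  rw [show i = ((i.toNat : Nat) : Int) from (Int.toNat_of_nonneg hi.1).symm,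
    PySem.List.pyGetD_natCast]
  rw [List.getD_eq_getElem _ _ (by simpa using hik)]
  simp
  congr 1
  omega

-- ===== VERDICT (by name: the statement is the Claim_ definition above) =====
theorem product_multiply_spec : Claim_equal_product_multiply := by
  intro matrix n _ hpre
  exact main_eq matrix n hpre.1 hpre.2.1
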